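-- pv_equiv track=rewrite | github.com/Navdeep-s/database_accessing_protocol | client.py | make_sense
-- ===== SOURCE A (Python) =====
-- NAME = 1
--
-- DEPARTMENT = 8
--
-- BLOOD_GROUP = 32
--
-- blood_group_mapping= {0:"A+",1:"B+",2:"A-",3:"B-",4:"AB-",5:"AB+",6:"O+",7:"O-"}
--
-- department_mapping = {0:"Chemical Engineering",
-- 					1:"Civil Engineering",
-- 					2:"Computer Science Engineering",
-- 					3:"Electrical Engineering",
-- 					4:"Mechanial Engineering"}
--
-- def make_sense(data,response_type):
--
-- 	chunks = data.split("\n\n")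
--
-- 	output=[]
-- 	lis = [1,2,4,8,16,32]
-- 	for chunk in chunks:
-- 		if(chunk==""):
-- 			break
-- 		dict_out = {}
-- 		rows = chunk.split("\n")
--
-- 		row_index =0
-- 		for elem in lis:
--
-- 			if(response_type&elem!=0):
--
-- 				if(elem==DEPARTMENT):
--
-- 					dict_out[elem]=department_mapping[int(rows[row_index])]
-- 				elif(elem==BLOOD_GROUP):
-- 					dict_out[elem]=blood_group_mapping[int(rows[row_index])]
-- 				elif(elem==NAME):
-- 					dict_out[elem]=rows[row_index].title()
--
-- 				else:
-- 					dict_out[elem]=rows[row_index]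
-- 				row_index= row_index+1
--
-- 			else:
-- 				dict_out[elem]=None
--
--
-- 		output.append(dict_out)
--
-- 	return output
-- ===== SOURCE B (Python) =====
-- NAME = 1
--
-- DEPARTMENT = 8
--
-- BLOOD_GROUP = 32
--
-- blood_group_mapping = {0: "A+", 1: "B+", 2: "A-", 3: "B-", 4: "AB-", 5: "AB+", 6: "O+", 7: "O-"}
--
-- department_mapping = {0: "Chemical Engineering",
--                       1: "Civil Engineering",
--                       2: "Computer Science Engineering",
--                       3: "Electrical Engineering",
--                       4: "Mechanial Engineering"}
--
-- FIELD_ORDER = [1, 2, 4, 8, 16, 32]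
--
--
-- def parse_field(e, row):
--     if e == DEPARTMENT:
--         return department_mapping[int(row)]
--     if e == BLOOD_GROUP:
--         return blood_group_mapping[int(row)]
--     if e == NAME:
--         return row.title()
--     return row
--
--
-- def make_sense(data, response_type):
--     chunks = data.split("\n\n")
--     # stop at the first empty chunk (closed-form truncation instead of a break)
--     stop = chunks.index("") if "" in chunks else len(chunks)
--     # the row of field e is the popcount of the active bits below e: no running counter
--     return [
--         {e: parse_field(e, chunk.split("\n")[bin(response_type & (e - 1)).count("1")])
--             if response_type & e else None
--          for e in FIELD_ORDER}
--         for chunk in chunks[:stop]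
--     ]
-- ===== Notes on version B (the rewrite author's own statement) =====
-- stated objective: alternative
-- what changed: A's break-on-empty loop with an interleaved bit-check-and-row-counter is replaced by truncating the chunk list up front at the first empty chunk and computing each active field's row index in closed form as the popcount of the active bits below it (bin(response_type & (e-1)).count('1')), so no running state is carried.
import Mathlib
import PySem

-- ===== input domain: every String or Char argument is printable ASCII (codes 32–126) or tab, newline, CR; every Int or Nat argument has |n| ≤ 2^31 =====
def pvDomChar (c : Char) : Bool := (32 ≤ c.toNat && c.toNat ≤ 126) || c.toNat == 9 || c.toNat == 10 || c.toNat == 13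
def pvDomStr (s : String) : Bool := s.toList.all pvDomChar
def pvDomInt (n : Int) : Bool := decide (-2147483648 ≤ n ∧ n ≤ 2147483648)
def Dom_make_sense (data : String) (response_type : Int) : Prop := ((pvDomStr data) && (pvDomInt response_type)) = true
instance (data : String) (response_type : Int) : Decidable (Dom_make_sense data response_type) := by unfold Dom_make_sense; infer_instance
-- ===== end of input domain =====

-- B replaces A's break-on-empty loop and running row counter by truncating the chunk list up
-- front and computing each field's row index in closed form as the popcount of the active bits
-- below it (objective: alternative).

-- ===== PORT A =====
-- module constants (shared by both ports, as in the Python module)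
def department_mapping : PySem.Dict Int String :=
  PySem.Dict.ofList [(0, "Chemical Engineering"), (1, "Civil Engineering"),
    (2, "Computer Science Engineering"), (3, "Electrical Engineering"), (4, "Mechanial Engineering")]

def blood_group_mapping : PySem.Dict Int String :=
  PySem.Dict.ofList [(0, "A+"), (1, "B+"), (2, "A-"), (3, "B-"), (4, "AB-"), (5, "AB+"), (6, "O+"), (7, "O-")]

-- hand port of str.title(): a letter after a cased (= ASCII alphabetic on this domain) character is
-- lowercased, a letter after a non-cased character is uppercased; exact on the printable-ASCII domain
def pvTitleChars : List Char → Bool → List Char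
  | [], _ => []
  | c :: cs, prev =>
    if c.isAlpha then (if prev then c.toLower else c.toUpper) :: pvTitleChars cs true
    else c :: pvTitleChars cs false

def pvTitle (s : String) : String := String.ofList (pvTitleChars s.toList false)

-- s.split(sep) with a nonempty literal sep: split? is never none, so getD [] is never taken
def pvRows (s : String) : List String := (PySem.Str.split? s "\n").getD []
def pvChunksOf (data : String) : List String := (PySem.Str.split? data "\n\n").getD []

def pvFieldOrder : List Int := [1, 2, 4, 8, 16, 32]

-- A's inner loop over lis with row_index; none = the Python raises (IndexError/ValueError/KeyError)
def pvFieldsA (rt : Int) (rows : List String) : List Int → Int → Option (List (Int × Option String))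
  | [], _ => some []
  | e :: es, i =>
    if PySem.Int.band rt e ≠ 0 then
      (if e = 8 then (PySem.List.pyGet? rows i).bind (fun r => (PySem.Int.ofStr? r).bind (fun k => (PySem.Dict.get? department_mapping k).map some))
       else if e = 32 then (PySem.List.pyGet? rows i).bind (fun r => (PySem.Int.ofStr? r).bind (fun k => (PySem.Dict.get? blood_group_mapping k).map some))
       else if e = 1 then (PySem.List.pyGet? rows i).map (fun r => some (pvTitle r))
       else (PySem.List.pyGet? rows i).map (fun r => some r)).bind
        (fun v => (pvFieldsA rt rows es (i + 1)).map (fun rest => (e, v) :: rest))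
    else (pvFieldsA rt rows es i).map (fun rest => (e, (none : Option String)) :: rest)

-- A's chunk loop with its break on the first empty chunk
def pvLoopA (rt : Int) : List String → Option (List (List (Int × Option String)))
  | [] => some []
  | c :: cs =>
    if c = "" then some []
    else (pvFieldsA rt (pvRows c) pvFieldOrder 0).bind
      (fun d => (pvLoopA rt cs).map (fun rest => d :: rest))

def make_sense (data : String) (response_type : Int) : List (List (Int × Option String)) :=
  (pvLoopA response_type (pvChunksOf data)).getD []

-- ===== PORT B =====
-- parse_field: the per-field transform
def pvParseField (e : Int) (r : String) : Option String :=
  if e = 8 then (PySem.Int.ofStr? r).bind (fun k => PySem.Dict.get? department_mapping k)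
  else if e = 32 then (PySem.Int.ofStr? r).bind (fun k => PySem.Dict.get? blood_group_mapping k)
  else if e = 1 then some (pvTitle r)
  else some r

-- bin(x).count("1"): x = response_type & (e-1) is nonnegative, where bin(x).count("1") = x.bit_count(),
-- which is PySem.Int.bitCount (exact there)
def pvRowIdx (rt e : Int) : Int := (PySem.Int.bitCount (PySem.Int.band rt (e - 1)) : Int)

-- the dict comprehension over FIELD_ORDER; none = the Python raises
def pvFieldsB (rt : Int) (rows : List String) : List Int → Option (List (Int × Option String))
  | [] => some []
  | e :: es =>
    (if PySem.Int.band rt e ≠ 0 then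
        (PySem.List.pyGet? rows (pvRowIdx rt e)).bind (fun r => (pvParseField e r).map some)
     else some none).bind
      (fun v => (pvFieldsB rt rows es).map (fun rest => (e, v) :: rest))

-- stop = chunks.index("") if "" in chunks else len(chunks)
def pvStop (cs : List String) : Nat := if "" ∈ cs then (PySem.List.index? cs "").getD 0 else cs.length

-- the outer list comprehension over chunks[:stop]
def pvLoopB (rt : Int) : List String → Option (List (List (Int × Option String)))
  | [] => some []
  | c :: cs =>
    (pvFieldsB rt (pvRows c) pvFieldOrder).bind
      (fun d => (pvLoopB rt cs).map (fun rest => d :: rest))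

def make_sense_alt (data : String) (response_type : Int) : List (List (Int × Option String)) :=
  (pvLoopB response_type (PySem.List.slice (pvChunksOf data) none (some (pvStop (pvChunksOf data) : Int)))).getD []

-- ===== PRECONDITION & SPEC =====
def pvActive (rt : Int) : List Int := pvFieldOrder.filter (fun e => decide (PySem.Int.band rt e ≠ 0))

def pvRowOk (e : Int) (r : String) : Bool :=
  if e = 8 then match PySem.Int.ofStr? r with | some k => decide (0 ≤ k ∧ k < 5) | none => false
  else if e = 32 then match PySem.Int.ofStr? r with | some k => decide (0 ≤ k ∧ k < 8) | none => false
  else true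

-- Pre_ excludes exactly the inputs on which A raises: some chunk before the first empty one has
-- fewer rows than active fields (IndexError) or a department/blood-group row that is not an int
-- in the mapping's key range (ValueError/KeyError); B raises on exactly those inputs too.
def Pre_make_sense (data : String) (response_type : Int) : Prop :=
  ∀ chunk ∈ (pvChunksOf data).takeWhile (fun c => decide (c ≠ "")),
    (pvActive response_type).length ≤ (pvRows chunk).length ∧
    ∀ pr ∈ (pvActive response_type).zip (pvRows chunk), pvRowOk pr.1 pr.2 = true

instance (data : String) (response_type : Int) : Decidable (Pre_make_sense data response_type) := by
  unfold Pre_make_sense; infer_instance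

def pvWitness_make_sense : String × Int := ("john doe\n2\n3", 41)

def Spec_make_sense (data : String) (response_type : Int) (out : List (List (Int × Option String))) : Prop := out = make_sense_alt data response_type
instance (data : String) (response_type : Int) (out : List (List (Int × Option String))) : Decidable (Spec_make_sense data response_type out) := by unfold Spec_make_sense; infer_instance

-- ===== CLAIM (what is proved, stated in full; the proofs are below) =====
def Claim_equal_make_sense : Prop := ∀ (data : String) (response_type : Int), Dom_make_sense data response_type → Pre_make_sense data response_type → Spec_make_sense data response_type (make_sense data response_type)

-- ===== LEMMAS AND PROOFS =====

-- both field loops depend on rt only through 'band rt m' for m ∈ {0,…,63}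
theorem pv_fieldsA_congr (rt n : Int)
    (h : ∀ m : Int, 0 ≤ m → m < 64 → PySem.Int.band rt m = PySem.Int.band n m)
    (rows : List String) :
    ∀ (es : List Int), (∀ e ∈ es, 1 ≤ e ∧ e < 64) →
    ∀ i : Int, pvFieldsA rt rows es i = pvFieldsA n rows es i := by
  intro es
  induction es with
  | nil => intro _ _; rfl
  | cons e es ih =>
    intro hb i
    obtain ⟨he1, he2⟩ := hb e List.mem_cons_self
    have hes : ∀ e ∈ es, 1 ≤ e ∧ e < 64 := fun x hx => hb x (List.mem_cons_of_mem _ hx)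
    simp only [pvFieldsA, h e (by omega) he2, ih hes]

theorem pv_fieldsB_congr (rt n : Int)
    (h : ∀ m : Int, 0 ≤ m → m < 64 → PySem.Int.band rt m = PySem.Int.band n m)
    (rows : List String) :
    ∀ (es : List Int), (∀ e ∈ es, 1 ≤ e ∧ e < 64) →
    pvFieldsB rt rows es = pvFieldsB n rows es := by
  intro es
  induction es with
  | nil => intro _; rfl
  | cons e es ih =>
    intro hb
    obtain ⟨he1, he2⟩ := hb e List.mem_cons_self
    have hes : ∀ e ∈ es, 1 ≤ e ∧ e < 64 := fun x hx => hb x (List.mem_cons_of_mem _ hx)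
    simp only [pvFieldsB, pvRowIdx, h e (by omega) he2, h (e - 1) (by omega) (by omega), ih hes]

-- low-6-bit reduction: x &&& m for m < 64 only sees x's low 6 bits
theorem pv_and_mod (x m : Nat) (hm : m < 64) : x &&& m = (x % 64) &&& m := by
  apply Nat.eq_of_testBit_eq
  intro j
  simp only [Nat.testBit_and]
  rcases Nat.lt_or_ge j 6 with hj | hj
  · rw [show (64 : Nat) = 2 ^ 6 by norm_num, Nat.testBit_mod_two_pow]
    simp [hj]
  · have : m.testBit j = false :=
      Nat.testBit_eq_false_of_lt (lt_of_lt_of_le hm (le_trans (by norm_num) (Nat.pow_le_pow_right (by norm_num) hj)))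
    simp [this]

-- clearing the bits of km from m' is masking with km's 6-bit complement
theorem pv_sub_and : ∀ m' < 64, ∀ km < 64, m' - (m' &&& km) = (63 - km) &&& m' := by decide

-- every rt agrees with some 6-bit n on all the masks the field loops use
theorem pv_small (rt : Int) :
    ∃ n : Int, 0 ≤ n ∧ n < 64 ∧ ∀ m : Int, 0 ≤ m → m < 64 → PySem.Int.band rt m = PySem.Int.band n m := by
  by_cases hrt : 0 ≤ rt
  · refine ⟨((rt.toNat % 64 : Nat) : Int), by positivity, ?_, ?_⟩
    · have := Nat.mod_lt rt.toNat (show 0 < 64 by norm_num)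
      exact_mod_cast this
    · intro m hm0 hm
      rw [PySem.Int.band_of_nonneg hrt hm0, PySem.Int.band_of_nonneg (by positivity) hm0,
        Int.toNat_natCast, pv_and_mod rt.toNat m.toNat (by omega)]
  · refine ⟨((63 - ((-rt - 1).toNat % 64) : Nat) : Int), by positivity, ?_, ?_⟩
    · have : (63 - ((-rt - 1).toNat % 64) : Nat) ≤ 63 := by omega
      exact_mod_cast Nat.lt_succ_of_le this
    · intro m hm0 hm
      have hL : PySem.Int.band rt m = ((m.toNat - (m.toNat &&& (-rt - 1).toNat) : Nat) : Int) := by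
        simp only [PySem.Int.band, if_neg hrt, if_pos hm0]
      have hR : PySem.Int.band (((63 - ((-rt - 1).toNat % 64) : Nat) : Int)) m
          = (((63 - ((-rt - 1).toNat % 64)) &&& m.toNat : Nat) : Int) := by
        rw [PySem.Int.band_of_nonneg (by positivity) hm0, Int.toNat_natCast]
      rw [hL, hR]
      have h1 : m.toNat &&& (-rt - 1).toNat = m.toNat &&& ((-rt - 1).toNat % 64) := by
        rw [Nat.and_comm, pv_and_mod (-rt - 1).toNat m.toNat (by omega), Nat.and_comm]
      have h2 : m.toNat - (m.toNat &&& (-rt - 1).toNat)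
          = (63 - ((-rt - 1).toNat % 64)) &&& m.toNat := by
        rw [h1, pv_sub_and m.toNat (by omega) ((-rt - 1).toNat % 64) (by omega)]
      exact_mod_cast congrArg (fun x : Nat => (x : Int)) h2

-- the core: for rt with only the low 6 bits set, A's running row counter equals B's popcount index
set_option maxHeartbeats 1600000 in
theorem pv_core (n : Int) (h0 : 0 ≤ n) (h64 : n < 64) (rows : List String) :
    pvFieldsA n rows pvFieldOrder 0 = pvFieldsB n rows pvFieldOrder := by
  interval_cases n <;>
    simp [pvFieldsA, pvFieldsB, pvFieldOrder, pvRowIdx, pvParseField, PySem.Int.band, Int.toNat,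
      PySem.Int.bitCount, PySem.Int.bitCountAux, Option.bind_assoc, Option.map_eq_bind, Function.comp]

theorem pv_chunk (rt : Int) (rows : List String) :
    pvFieldsA rt rows pvFieldOrder 0 = pvFieldsB rt rows pvFieldOrder := by
  obtain ⟨n, h0, h64, hband⟩ := pv_small rt
  have hb : ∀ e ∈ pvFieldOrder, (1:Int) ≤ e ∧ e < 64 := by decide
  rw [pv_fieldsA_congr rt n hband rows pvFieldOrder hb 0,
    pv_fieldsB_congr rt n hband rows pvFieldOrder hb, pv_core n h0 h64 rows]

-- chunks[:stop] peels off like take-while-nonempty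
theorem pv_trunc_nil : PySem.List.slice ([] : List String) none (some (pvStop [] : Int)) = [] := by
  rw [PySem.List.slice_to_natCast]
  simp

theorem pv_trunc_cons_empty (cs : List String) :
    PySem.List.slice ("" :: cs) none (some (pvStop ("" :: cs) : Int)) = [] := by
  rw [PySem.List.slice_to_natCast]
  have h0 : PySem.List.index? ("" :: cs) "" = some 0 := PySem.List.index?_cons_self "" cs
  have hs : pvStop ("" :: cs) = 0 := by
    unfold pvStop
    rw [if_pos (List.mem_cons_self : "" ∈ "" :: cs), h0]
    rfl
  rw [hs]
  rfl

theorem pv_trunc_cons (c : String) (cs : List String) (hc : c ≠ "") :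
    PySem.List.slice (c :: cs) none (some (pvStop (c :: cs) : Int)) =
      c :: PySem.List.slice cs none (some (pvStop cs : Int)) := by
  rw [PySem.List.slice_to_natCast, PySem.List.slice_to_natCast]
  have key : pvStop (c :: cs) = pvStop cs + 1 := by
    by_cases h : "" ∈ cs
    · obtain ⟨i, hi⟩ := Option.isSome_iff_exists.mp ((PySem.List.index?_isSome_iff cs "").mpr h)
      have h1 : PySem.List.index? (c :: cs) "" = some (i + 1) := by
        rw [PySem.List.index?_cons_of_ne cs hc, hi]; rfl
      have hmem : "" ∈ c :: cs := List.mem_cons_of_mem _ h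
      unfold pvStop
      rw [if_pos hmem, if_pos h, h1, hi]
      rfl
    · have hmem : "" ∉ c :: cs := by
        intro hx
        rcases List.mem_cons.mp hx with hx | hx
        · exact hc hx.symm
        · exact h hx
      unfold pvStop
      rw [if_neg hmem, if_neg h]
      rfl
  rw [key, List.take_succ_cons]

theorem pv_loop_eq (rt : Int) : ∀ cs : List String,
    pvLoopA rt cs = pvLoopB rt (PySem.List.slice cs none (some (pvStop cs : Int))) := by
  intro cs
  induction cs with
  | nil => rw [pv_trunc_nil]; rfl
  | cons c cs ih =>
    by_cases hc : c = ""
    · subst hc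
      rw [pv_trunc_cons_empty]
      simp [pvLoopA, pvLoopB]
    · rw [pv_trunc_cons c cs hc]
      simp only [pvLoopA, pvLoopB, if_neg hc, pv_chunk rt (pvRows c), ih]

-- ===== VERDICT (by name: the statement is the Claim_ definition above) =====
theorem make_sense_spec : Claim_equal_make_sense := by
  intro data rt _hdom _hpre
  unfold Spec_make_sense make_sense make_sense_alt
  rw [pv_loop_eq rt (pvChunksOf data)]
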